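-- pv_equiv track=rewrite | github.com/TusharElangovan/ChatDB-DSCI551 | FinalSQLFlow.py | separate_sentence_parts
-- ===== SOURCE A (Python) =====
-- def separate_sentence_parts(sentence):
--     sql_keywords = {"SELECT", "GIVE", "SHOW", "FROM", "WHERE", "GROUP", "HAVING", "ORDER", "JOIN", "LIMIT"}
--
--     # Split the sentence into words
--     words = sentence.split()
--
--     # Initialize an empty list to store sentence parts
--     sentence_parts = []
--     current_part = []
--
--     # Iterate through the words, building sentence parts based on SQL keywords
--     for word in words:
--         if word.upper() in sql_keywords:
--             if current_part:
--                 sentence_parts.append(' '.join(current_part))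
--                 current_part = []
--         current_part.append(word)
--
--     # Add the last part to the list
--     if current_part:
--         sentence_parts.append(' '.join(current_part))
--
--     return sentence_parts
-- ===== SOURCE B (Python) =====
-- def separate_sentence_parts(sentence):
--     sql_keywords = {"SELECT", "GIVE", "SHOW", "FROM", "WHERE", "GROUP", "HAVING", "ORDER", "JOIN", "LIMIT"}
--
--     def chunks(words):
--         # recursive decomposition: the first part is words[0] plus the run of
--         # non-keyword words after it; recurse on the remainder
--         if not words:
--             return []
--         rest = words[1:]
--         k = 0
--         while k < len(rest) and rest[k].upper() not in sql_keywords: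
--             k += 1
--         return [' '.join(words[:k + 1])] + chunks(rest[k:])
--
--     return chunks(sentence.split())
-- ===== Notes on version B (the rewrite author's own statement) =====
-- stated objective: alternative
-- what changed: Replaces the flush-on-keyword accumulator loop by a recursive span decomposition: each part is the head word plus the following run of non-keyword words, recursing on the rest.
import Mathlib
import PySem

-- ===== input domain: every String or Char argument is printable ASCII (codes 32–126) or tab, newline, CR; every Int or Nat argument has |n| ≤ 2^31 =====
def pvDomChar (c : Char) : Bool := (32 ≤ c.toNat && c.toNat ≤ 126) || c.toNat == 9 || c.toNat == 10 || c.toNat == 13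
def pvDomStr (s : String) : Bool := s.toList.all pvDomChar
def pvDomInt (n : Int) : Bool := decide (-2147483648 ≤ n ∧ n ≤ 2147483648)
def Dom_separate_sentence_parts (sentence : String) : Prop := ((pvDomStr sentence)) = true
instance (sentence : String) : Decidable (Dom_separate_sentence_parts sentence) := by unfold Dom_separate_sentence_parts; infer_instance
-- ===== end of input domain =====

-- B changes the decomposition only (same cost): a recursive span split instead of A's flush-on-keyword accumulator loop.

-- the sql_keywords set literal (shared constant of both Pythons)
def pvKeywords : PySem.Set String :=
  PySem.Set.ofList ["SELECT", "GIVE", "SHOW", "FROM", "WHERE", "GROUP", "HAVING", "ORDER", "JOIN", "LIMIT"]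

-- ===== PORT A =====
-- loop body: flush current on a keyword word, then append the word to current
def pvStepA (st : List String × List String) (word : String) : List String × List String :=
  let st :=
    if PySem.Str.upper word ∈ pvKeywords then
      if st.2 ≠ [] then (st.1 ++ [PySem.Str.join " " st.2], ([] : List String)) else st
    else st
  (st.1, st.2 ++ [word])

def separate_sentence_parts (sentence : String) : List String :=
  let words := PySem.Str.split₀ sentence
  let st := words.foldl pvStepA ([], [])
  if st.2 ≠ [] then st.1 ++ [PySem.Str.join " " st.2] else st.1

-- ===== PORT B =====
-- the while loop 'k = 0; while k < len(rest) and rest[k].upper() not in KW: k += 1'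
def pvRunLen (rest : List String) : Nat :=
  match rest with
  | [] => 0
  | w :: ws => if PySem.Str.upper w ∈ pvKeywords then 0 else pvRunLen ws + 1

def pvChunks (words : List String) : List String :=
  match words with
  | [] => []
  | w :: rest =>
      let k := pvRunLen rest
      PySem.Str.join " " ((w :: rest).take (k + 1)) :: pvChunks (rest.drop k)
termination_by words.length
decreasing_by
  simp only [List.length_cons, List.length_drop]
  omega

def separate_sentence_parts_alt (sentence : String) : List String :=
  pvChunks (PySem.Str.split₀ sentence)

-- ===== PRECONDITION & SPEC =====
def Spec_separate_sentence_parts (sentence : String) (out : List String) : Prop := out = separate_sentence_parts_alt sentence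
instance (sentence : String) (out : List String) : Decidable (Spec_separate_sentence_parts sentence out) := by unfold Spec_separate_sentence_parts; infer_instance

-- ===== CLAIM (what is proved, stated in full; the proofs are below) =====
def Claim_equal_separate_sentence_parts : Prop := ∀ (sentence : String), Dom_separate_sentence_parts sentence → Spec_separate_sentence_parts sentence (separate_sentence_parts sentence)

-- ===== LEMMAS AND PROOFS =====

-- unfolding equations for the well-founded pvChunks
lemma pvChunks_nil : pvChunks [] = [] := by rw [pvChunks]

lemma pvChunks_cons (w : String) (rest : List String) :
    pvChunks (w :: rest) =
      PySem.Str.join " " ((w :: rest).take (pvRunLen rest + 1)) :: pvChunks (rest.drop (pvRunLen rest)) := by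
  rw [pvChunks]

-- A's finalization step, on an arbitrary fold state
def pvFinish (st : List String × List String) : List String :=
  if st.2 ≠ [] then st.1 ++ [PySem.Str.join " " st.2] else st.1

-- invariant: from a state with non-empty current part, A's remaining loop + finalization
-- produces exactly B's span decomposition of (current ++ remaining words)
lemma pvLoop_eq_chunks (ws : List String) : ∀ (parts cur : List String), cur ≠ [] →
    pvFinish (ws.foldl pvStepA (parts, cur)) =
      parts ++ (PySem.Str.join " " (cur ++ ws.take (pvRunLen ws)) :: pvChunks (ws.drop (pvRunLen ws))) := by
  induction ws with
  | nil =>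
    intro parts cur hcur
    simp [pvFinish, pvChunks_nil, pvRunLen, hcur]
  | cons w ws ih =>
    intro parts cur hcur
    by_cases hk : PySem.Str.upper w ∈ pvKeywords
    · have hstep : pvStepA (parts, cur) w = (parts ++ [PySem.Str.join " " cur], [w]) := by
        simp [pvStepA, hk, hcur]
      rw [List.foldl_cons, hstep, ih (parts ++ [PySem.Str.join " " cur]) [w] (by simp)]
      simp [pvRunLen, pvChunks_cons, hk, List.take_succ_cons]
    · have hstep : pvStepA (parts, cur) w = (parts, cur ++ [w]) := by
        simp [pvStepA, hk]
      rw [List.foldl_cons, hstep, ih parts (cur ++ [w]) (by simp)]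
      simp [pvRunLen, hk, List.take_succ_cons, List.drop_succ_cons]

-- ===== VERDICT (by name: the statement is the Claim_ definition above) =====
theorem separate_sentence_parts_spec : Claim_equal_separate_sentence_parts := by
  intro sentence _
  unfold Spec_separate_sentence_parts separate_sentence_parts separate_sentence_parts_alt
  cases hw : PySem.Str.split₀ sentence with
  | nil => simp [pvChunks_nil]
  | cons w ws =>
    have hstep : pvStepA ([], []) w = ([], [w]) := by
      simp [pvStepA]
    show pvFinish ((w :: ws).foldl pvStepA ([], [])) = pvChunks (w :: ws)
    rw [List.foldl_cons, hstep, pvLoop_eq_chunks ws [] [w] (by simp)]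
    simp [pvChunks_cons, List.take_succ_cons]
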